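-- pv_equiv track=rewrite | github.com/pypi-data/pypi-mirror-401 | packages/verkkofillet/verkkofillet-0.1.20-py3-none-any.whl/verkkofillet/preprocessing/_patching_from_other_asm.py | compress_cigar
-- ===== SOURCE A (Python) =====
-- from typing import List, Tuple, Optional
--
-- def compress_cigar(ops: List[Tuple[str,int]]) -> str:
--     """Coalesce adjacent same-op runs and drop zero-length ops."""
--     out: List[Tuple[str,int]] = []
--     for op, n in ops:
--         if n <= 0:
--             continue
--         if out and out[-1][0] == op:
--             out[-1] = (op, out[-1][1] + n)
--         else:
--             out.append((op, n))
--     return "".join(f"{n}{op}" for op, n in out)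
-- ===== SOURCE B (Python) =====
-- from typing import List, Tuple
--
-- def compress_cigar(ops: List[Tuple[str, int]]) -> str:
--     """Coalesce adjacent same-op runs and drop zero-length ops,
--     by divide and conquer: compress each half, then merge at the seam."""
--     def merge(a, b):
--         if a and b and a[-1][0] == b[0][0]:
--             return a[:-1] + [(b[0][0], a[-1][1] + b[0][1])] + b[1:]
--         return a + b
--
--     def go(lst):
--         if len(lst) <= 1:
--             return [p for p in lst if p[1] > 0]
--         mid = len(lst) // 2
--         return merge(go(lst[:mid]), go(lst[mid:]))
--
--     return "".join(f"{n}{op}" for op, n in go(ops))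
-- ===== Notes on version B (the rewrite author's own statement) =====
-- stated objective: alternative
-- what changed: Replaces A's single left-to-right pass that mutates the last accumulated entry with a divide-and-conquer scheme: each half of the list is compressed recursively and the two compressed halves are merged at their single seam.
import Mathlib
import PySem

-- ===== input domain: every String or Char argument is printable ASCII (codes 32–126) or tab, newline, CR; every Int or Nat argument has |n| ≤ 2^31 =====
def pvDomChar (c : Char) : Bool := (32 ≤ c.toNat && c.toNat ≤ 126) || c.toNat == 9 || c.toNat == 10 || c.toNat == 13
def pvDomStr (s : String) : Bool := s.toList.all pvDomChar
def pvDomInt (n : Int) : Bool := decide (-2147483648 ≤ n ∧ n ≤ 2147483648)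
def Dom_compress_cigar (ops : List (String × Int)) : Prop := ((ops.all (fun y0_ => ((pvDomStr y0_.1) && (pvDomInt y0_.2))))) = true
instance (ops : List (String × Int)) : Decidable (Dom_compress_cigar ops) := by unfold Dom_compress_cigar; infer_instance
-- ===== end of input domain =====

-- B replaces A's single-pass mutate-last-entry accumulator loop by divide and conquer
-- (compress each half recursively, merge the compressed halves at the seam); objective: alternative. Both are total.

-- ===== PORT A =====
def pvALoop : List (String × Int) → List (String × Int) → List (String × Int)
  | out, [] => out
  | out, (op, n) :: rest =>
    if n ≤ 0 then pvALoop out rest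
    else
      match out.getLast? with
      | some (opl, m) =>
        if opl == op then pvALoop (out.dropLast ++ [(op, m + n)]) rest
        else pvALoop (out ++ [(op, n)]) rest
      | none => pvALoop (out ++ [(op, n)]) rest

def compress_cigar (ops : List (String × Int)) : String :=
  String.join ((pvALoop [] ops).map (fun p => PySem.Int.toStr p.2 ++ p.1))

-- ===== PORT B =====
-- merge(a, b): 'a[:-1] + [(b[0][0], a[-1][1] + b[0][1])] + b[1:]' when both nonempty with equal ops, else a + b
def pvMerge (a b : List (String × Int)) : List (String × Int) :=
  match a.getLast?, b with
  | some (opa, na), (opb, nb) :: bt =>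
      if opa == opb then a.dropLast ++ [(opb, na + nb)] ++ bt else a ++ b
  | none, _ => a ++ b
  | some _, [] => a ++ b

-- go(lst): length ≤ 1 base case filters positives; otherwise split at len//2, recurse, merge
def pvGo (lst : List (String × Int)) : List (String × Int) :=
  if lst.length ≤ 1 then lst.filter (fun p => decide (0 < p.2))
  else pvMerge (pvGo (lst.take (lst.length / 2))) (pvGo (lst.drop (lst.length / 2)))
termination_by lst.length
decreasing_by
  · simp only [List.length_take]; omega
  · simp only [List.length_drop]; omega

def compress_cigar_alt (ops : List (String × Int)) : String :=
  String.join ((pvGo ops).map (fun p => PySem.Int.toStr p.2 ++ p.1))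

-- ===== PRECONDITION & SPEC =====
def Spec_compress_cigar (ops : List (String × Int)) (out : String) : Prop := out = compress_cigar_alt ops
instance (ops : List (String × Int)) (out : String) : Decidable (Spec_compress_cigar ops out) := by unfold Spec_compress_cigar; infer_instance

-- ===== CLAIM (what is proved, stated in full; the proofs are below) =====
def Claim_equal_compress_cigar : Prop := ∀ (ops : List (String × Int)), Dom_compress_cigar ops → Spec_compress_cigar ops (compress_cigar ops)

-- ===== LEMMAS AND PROOFS =====

-- one step of A's loop, for a positive-length op
def pvStep (out : List (String × Int)) (op : String) (n : Int) : List (String × Int) :=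
  match out.getLast? with
  | some (opl, m) => if opl == op then out.dropLast ++ [(op, m + n)] else out ++ [(op, n)]
  | none => out ++ [(op, n)]

lemma pvALoop_step (out : List (String × Int)) (op : String) (n : Int) (rest : List (String × Int))
    (hn : ¬ n ≤ 0) :
    pvALoop out ((op, n) :: rest) = pvALoop (pvStep out op n) rest := by
  simp only [pvALoop, if_neg hn, pvStep]
  match h : out.getLast? with
  | none => simp
  | some (opl, m) => by_cases hop : (opl == op) = true <;> simp [hop]

-- A's loop over an appended list runs the two pieces in sequence
lemma pvALoop_append (xs ys out : List (String × Int)) :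
    pvALoop out (xs ++ ys) = pvALoop (pvALoop out xs) ys := by
  induction xs generalizing out with
  | nil => simp [pvALoop]
  | cons hd tl ih =>
    obtain ⟨op, n⟩ := hd
    by_cases hn : n ≤ 0
    · simp only [List.cons_append, pvALoop, if_pos hn]; exact ih out
    · rw [List.cons_append, pvALoop_step _ _ _ _ hn, pvALoop_step _ _ _ _ hn]
      exact ih _

-- A's loop on a short list (length ≤ 1) is just the positivity filter
lemma pvALoop_short (lst : List (String × Int)) (h : lst.length ≤ 1) :
    pvALoop [] lst = lst.filter (fun p => decide (0 < p.2)) := by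
  match lst with
  | [] => rfl
  | [(op, n)] =>
    by_cases hn : n ≤ 0
    · have : ¬ (0 < n) := by omega
      simp [pvALoop, hn, this]
    · have : 0 < n := by omega
      simp [pvALoop, hn, this]
  | p :: q :: t => simp at h

-- the group list of ys, as produced by filtering then grouping consecutive equal ops
def pvBGroup : List (String × Int) → List (String × Int)
  | [] => []
  | (op, n) :: rest =>
    (op, n + ((rest.takeWhile (fun p => p.1 == op)).map Prod.snd).sum)
      :: pvBGroup (rest.dropWhile (fun p => p.1 == op))
termination_by l => l.length
decreasing_by
  simp only [List.length_cons]
  have := List.length_dropWhile_le (fun p => p.1 == op) rest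
  omega

lemma pvStep_concat (xs : List (String × Int)) (op : String) (v k : Int) :
    pvStep (xs ++ [(op, v)]) op k = xs ++ [(op, v + k)] := by
  simp [pvStep]

lemma pvStep_concat_ne (xs : List (String × Int)) (op' op : String) (v k : Int)
    (h : (op' == op) = false) :
    pvStep (xs ++ [(op', v)]) op k = (xs ++ [(op', v)]) ++ [(op, k)] := by
  simp [pvStep, h]

lemma pvStep_shape (out : List (String × Int)) (op : String) (n : Int) :
    ∃ ys v, pvStep out op n = ys ++ [(op, v)] := by
  unfold pvStep
  match h : out.getLast? with
  | none => exact ⟨out, n, rfl⟩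
  | some (opl, m) =>
    by_cases hop : (opl == op) = true
    · refine ⟨out.dropLast, m + n, ?_⟩; simp [hop]
    · refine ⟨out, n, ?_⟩; simp [hop]

-- gluing a group list onto A's accumulator: the first group goes through one A-step
def pvGlue (out gs : List (String × Int)) : List (String × Int) :=
  match gs with
  | [] => out
  | (op, n) :: t => pvStep out op n ++ t

lemma pvStep_step (out : List (String × Int)) (op : String) (n k : Int) :
    pvStep (pvStep out op n) op k = pvStep out op (n + k) := by
  obtain ⟨ys, v, hy⟩ := pvStep_shape out op n
  rw [hy, pvStep_concat]
  unfold pvStep at hy ⊢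
  match h : out.getLast? with
  | none => simp [h] at hy ⊢; exact ⟨hy.1.symm, by omega⟩
  | some (opl, m) =>
    by_cases hop : (opl == op) = true
    · simp [h, hop] at hy ⊢
      exact ⟨hy.1.symm, by omega⟩
    · simp [h, hop] at hy ⊢
      exact ⟨hy.1.symm, by omega⟩

lemma pvBGroup_cons (op : String) (n : Int) (rest : List (String × Int)) :
    pvBGroup ((op, n) :: rest) =
      (op, n + ((rest.takeWhile (fun p => p.1 == op)).map Prod.snd).sum)
        :: pvBGroup (rest.dropWhile (fun p => p.1 == op)) := by
  rw [pvBGroup]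

-- the key commuting step: consuming one positive op on either side
lemma pvGlue_step (out : List (String × Int)) (op : String) (n : Int)
    (F : List (String × Int)) :
    pvGlue out (pvBGroup ((op, n) :: F)) = pvGlue (pvStep out op n) (pvBGroup F) := by
  match F with
  | [] => simp [pvBGroup_cons, pvBGroup, pvGlue]
  | (op2, m) :: F' =>
    by_cases hop : (op2 == op) = true
    · have hop' : op2 = op := by simpa using hop
      subst hop'
      rw [pvBGroup_cons, pvBGroup_cons]
      simp only [List.takeWhile, List.dropWhile, beq_self_eq_true]
      simp only [pvGlue, List.map_cons, List.sum_cons]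
      rw [pvStep_step]
    · have hop' : (op2 == op) = false := by simpa using hop
      rw [pvBGroup_cons, pvBGroup_cons]
      simp only [List.takeWhile, List.dropWhile, hop']
      simp only [pvGlue, List.map_nil, List.sum_nil, Int.add_zero]
      obtain ⟨ys, v, hy⟩ := pvStep_shape out op n
      rw [hy]
      have : (op == op2) = false := by
        rw [beq_eq_false_iff_ne] at hop' ⊢; exact fun h => hop' h.symm
      rw [pvStep_concat_ne _ _ _ _ _ this]
      simp only [List.append_assoc, List.cons_append, List.nil_append]
      rw [pvBGroup_cons]

-- A's loop computes the glue of the group list onto the accumulator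
lemma pvALoop_eq_glue (ops out : List (String × Int)) :
    pvALoop out ops = pvGlue out (pvBGroup (ops.filter (fun p => decide (0 < p.2)))) := by
  induction ops generalizing out with
  | nil => simp [pvALoop, pvGlue, pvBGroup]
  | cons hd tl ih =>
    obtain ⟨op, n⟩ := hd
    by_cases hn : n ≤ 0
    · have : ¬ (0 < n) := by omega
      simp only [pvALoop, if_pos hn, List.filter_cons, this, decide_false]
      exact ih out
    · have h0 : 0 < n := by omega
      rw [pvALoop_step _ _ _ _ hn, ih, List.filter_cons]
      simp only [h0, decide_true, if_true]
      rw [pvGlue_step]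

-- glueing a group list is exactly B's seam merge
lemma pvGlue_eq_merge (u gs : List (String × Int)) : pvGlue u gs = pvMerge u gs := by
  match gs with
  | [] =>
    unfold pvGlue pvMerge
    match u.getLast? with
    | none => simp
    | some (a, b) => simp
  | (op, n) :: t =>
    unfold pvGlue pvMerge pvStep
    match u.getLast? with
    | none => simp
    | some (opl, m) => by_cases hop : (opl == op) = true <;> simp [hop]

-- merging two compressed pieces compresses the concatenation
lemma pvMerge_alab (xs ys : List (String × Int)) :
    pvMerge (pvALoop [] xs) (pvALoop [] ys) = pvALoop [] (xs ++ ys) := by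
  have hys : pvALoop [] ys = pvBGroup (ys.filter (fun p => decide (0 < p.2))) := by
    rw [pvALoop_eq_glue]
    match pvBGroup (ys.filter (fun p => decide (0 < p.2))) with
    | [] => rfl
    | (op, n) :: t => simp [pvGlue, pvStep]
  rw [pvALoop_append, pvALoop_eq_glue _ (pvALoop [] xs), pvGlue_eq_merge, hys]

lemma pvGo_eq (lst : List (String × Int)) : pvGo lst = pvALoop [] lst := by
  induction lst using pvGo.induct with
  | case1 lst h => rw [pvGo, if_pos h, pvALoop_short lst h]
  | case2 lst h ih1 ih2 =>
    rw [pvGo, if_neg h, ih1, ih2, pvMerge_alab, List.take_append_drop]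

-- ===== VERDICT (by name: the statement is the Claim_ definition above) =====
theorem compress_cigar_spec : Claim_equal_compress_cigar := by
  intro ops _
  unfold Spec_compress_cigar compress_cigar compress_cigar_alt
  rw [pvGo_eq]
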